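-- pv_equiv track=rewrite | github.com/baxt1or/leetcode_algorithms_and_data_structure | Hash Table/3450. Maximum Students on a Single Bench/solution.py | maxStudentsOnBench
-- ===== SOURCE A (Python) =====
-- from typing import List, defaultdict
--
-- def maxStudentsOnBench(students: List[List[int]]) -> int:
--
--     benchs = defaultdict(set)
--
--     for row in students:
--         benchs[row[1]].add(row[0])
--
--     max_students = 0
--
--     for key, vals in benchs.items():
--         max_students = max(max_students, len(vals))
--
--     return max_students
-- ===== SOURCE B (Python) =====
-- def maxStudentsOnBench(students):
--     benches = {row[1] for row in students}
--     return max((len({row[0] for row in students if row[1] == b}) for b in benches), default=0)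
-- ===== Notes on version B (the rewrite author's own statement) =====
-- stated objective: idiomatic
-- what changed: Replaces the incrementally built defaultdict-of-sets and the explicit running-max loop by a set comprehension over distinct benches with a per-bench distinct-student count folded into a single max(..., default=0) expression.
import Mathlib
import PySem

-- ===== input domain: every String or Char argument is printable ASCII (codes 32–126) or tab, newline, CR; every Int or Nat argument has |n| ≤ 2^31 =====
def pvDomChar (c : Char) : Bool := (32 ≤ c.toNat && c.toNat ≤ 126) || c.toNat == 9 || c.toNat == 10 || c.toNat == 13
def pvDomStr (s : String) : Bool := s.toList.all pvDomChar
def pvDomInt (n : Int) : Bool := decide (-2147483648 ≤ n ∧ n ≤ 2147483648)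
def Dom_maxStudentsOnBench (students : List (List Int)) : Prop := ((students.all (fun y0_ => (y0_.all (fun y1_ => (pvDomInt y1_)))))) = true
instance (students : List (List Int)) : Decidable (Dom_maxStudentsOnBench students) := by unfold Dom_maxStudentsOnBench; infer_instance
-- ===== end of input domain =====

-- B replaces the incrementally built defaultdict-of-sets and running-max loop by a
-- comprehension over distinct benches with per-bench distinct counts folded into max(..., default=0).


-- ===== PORT A =====
-- benchs = defaultdict(set); for row: benchs[row[1]].add(row[0]); then running max of len(vals).
-- row[1]/row[0] are pyGet? with .getD 0 as totalization (Pre_ excludes the none case).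
def maxStudentsOnBench (students : List (List Int)) : Int :=
  ((students.foldl
      (fun (d : PySem.Dict Int (PySem.Set Int)) row =>
        d.modify ((PySem.List.pyGet? row 1).getD 0) PySem.Set.empty
          (fun s => PySem.Set.add s ((PySem.List.pyGet? row 0).getD 0)))
      PySem.Dict.empty).items).foldl (fun m kv => max m (kv.2.length : Int)) 0

-- ===== PORT B =====
def maxStudentsOnBench_alt (students : List (List Int)) : Int :=
  (((PySem.Set.ofList (students.map (fun row => (PySem.List.pyGet? row 1).getD 0))).map
      (fun b =>
        ((PySem.Set.ofList
            ((students.filter (fun row => (PySem.List.pyGet? row 1).getD 0 == b)).map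
              (fun row => (PySem.List.pyGet? row 0).getD 0))).length : Int))).foldl max 0)

-- ===== PRECONDITION & SPEC =====
-- Pre_ excludes exactly the inputs with a row of fewer than 2 elements, on which row[1] (or row[0]) raises IndexError in A (and in B).
def Pre_maxStudentsOnBench (students : List (List Int)) : Prop :=
  ∀ row ∈ students, 2 ≤ row.length
instance (students : List (List Int)) : Decidable (Pre_maxStudentsOnBench students) := by unfold Pre_maxStudentsOnBench; infer_instance
def pvWitness_maxStudentsOnBench : List (List Int) := [[1, 2], [3, 2], [1, 5]]

def Spec_maxStudentsOnBench (students : List (List Int)) (out : Int) : Prop := out = maxStudentsOnBench_alt students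
instance (students : List (List Int)) (out : Int) : Decidable (Spec_maxStudentsOnBench students out) := by unfold Spec_maxStudentsOnBench; infer_instance

-- ===== CLAIM (what is proved, stated in full; the proofs are below) =====
def Claim_equal_maxStudentsOnBench : Prop := ∀ (students : List (List Int)), Dom_maxStudentsOnBench students → Pre_maxStudentsOnBench students → Spec_maxStudentsOnBench students (maxStudentsOnBench students)

-- ===== LEMMAS AND PROOFS =====

-- The grouping loop's entry at bench b is the set of students whose row's bench is b.
lemma getD_group_loop (l : List (List Int)) (d : PySem.Dict Int (PySem.Set Int)) (b : Int) :
    (l.foldl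
      (fun d row =>
        d.modify ((PySem.List.pyGet? row 1).getD 0) PySem.Set.empty
          (fun s => PySem.Set.add s ((PySem.List.pyGet? row 0).getD 0)))
      d).getD b PySem.Set.empty
    = PySem.Set.update (d.getD b PySem.Set.empty)
        ((l.filter (fun row => (PySem.List.pyGet? row 1).getD 0 == b)).map
          (fun row => (PySem.List.pyGet? row 0).getD 0)) := by
  induction l generalizing d with
  | nil => simp [PySem.Set.update]
  | cons r t ih =>
    simp only [List.foldl_cons, ih, List.filter_cons]
    rw [PySem.Dict.getD_modify]
    by_cases h : (PySem.List.pyGet? r 1).getD 0 = b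
    · simp [h, PySem.Set.update]
    · have hb : ¬ b = (PySem.List.pyGet? r 1).getD 0 := fun e => h e.symm
      have hbe : ((PySem.List.pyGet? r 1).getD 0 == b) = false := by simp [h]
      simp [hbe, hb]

theorem maxStudentsOnBench_spec_aux (students : List (List Int)) :
    maxStudentsOnBench students = maxStudentsOnBench_alt students := by
  unfold maxStudentsOnBench maxStudentsOnBench_alt
  have hnd : (students.foldl
      (fun (d : PySem.Dict Int (PySem.Set Int)) row =>
        d.modify ((PySem.List.pyGet? row 1).getD 0) PySem.Set.empty
          (fun s => PySem.Set.add s ((PySem.List.pyGet? row 0).getD 0)))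
      PySem.Dict.empty).keys.Nodup :=
    PySem.Dict.nodup_keys_foldl_modify_key students
      (fun row => (PySem.List.pyGet? row 1).getD 0) PySem.Set.empty
      (fun _ row s => PySem.Set.add s ((PySem.List.pyGet? row 0).getD 0)) PySem.Dict.empty
      PySem.Dict.nodup_keys_empty
  rw [PySem.Dict.items_eq_map_keys _ hnd PySem.Set.empty]
  rw [PySem.Dict.keys_foldl_modify_key students
      (fun row => (PySem.List.pyGet? row 1).getD 0) PySem.Set.empty
      (fun _ row s => PySem.Set.add s ((PySem.List.pyGet? row 0).getD 0)) PySem.Dict.empty]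
  have hupd : PySem.Set.update (PySem.Dict.empty (κ := Int) (ν := PySem.Set Int)).keys
      (students.map (fun row => (PySem.List.pyGet? row 1).getD 0))
      = PySem.Set.ofList (students.map (fun row => (PySem.List.pyGet? row 1).getD 0)) := by
    simp [PySem.Set.update, PySem.Set.ofList_eq_foldl, PySem.Dict.keys_empty]
  rw [hupd, List.foldl_map, List.foldl_map]
  apply PySem.List.foldl_congr_mem
  intro acc b _
  rw [getD_group_loop students PySem.Dict.empty b]
  simp [PySem.Set.update, PySem.Set.ofList_eq_foldl, PySem.Dict.getD_empty]

-- ===== VERDICT (by name: the statement is the Claim_ definition above) =====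
theorem maxStudentsOnBench_spec : Claim_equal_maxStudentsOnBench := by
  intro students _ _
  exact maxStudentsOnBench_spec_aux students
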